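-- pv_equiv track=rewrite | github.com/Mramar-croatia/WhatsappTranscriptDataanalyzer | functions.py | transcript_to_dictionary
-- ===== SOURCE A (Python) =====
-- def transcript_to_dictionary(chat_name, lines):
--
--     message_dict = {
--         'timestamp': [],
--         'chat_name': [],
--         'sender': [],
--         'contents': []
--     }
--
--     current_message = ['timestamp', 'chat_name', 'sender', 'contents']
--
--     current_message[0] = lines[0][:17]
--     line = lines[0][20:]
--     current_message[1] = chat_name
--     current_message[2] = line[:line.find(':')]
--     line = line[line.find(':') + 2:]
--     current_message[3] = line
--
--     lines.remove(lines[0])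
--
--     for line in lines:
--         if len(line) > 19 and line[2] == '/' and ':' in line[20:]:
--             message_dict['timestamp'].append(current_message[0])
--             message_dict['chat_name'].append(current_message[1])
--             message_dict['sender'].append(current_message[2])
--             message_dict['contents'].append(current_message[3])
--
--             current_message = ['timestamp', 'chat_name', 'sender', 'contents']
--
--             current_message[0] = line[:17]
--             line = line[20:]
--
--             current_message[1] = chat_name
--
--             current_message[2] = line[:line.find(':')]
--             line = line[line.find(':') + 2:]
--
--             current_message[3] = line
--
--         else:
--             current_message[3] += line
--
--     message_dict['timestamp'].append(current_message[0])
--     message_dict['chat_name'].append(current_message[1])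
--     message_dict['sender'].append(current_message[2])
--     message_dict['contents'].append(current_message[3])
--
--     return message_dict
-- ===== SOURCE B (Python) =====
-- def _is_header(line):
--     return len(line) > 19 and line[2] == '/' and ':' in line[20:]
--
--
-- def _parse(head, block):
--     body = head[20:]
--     sep = body.find(':')
--     return (head[:17], body[:sep], body[sep + 2:] + ''.join(block))
--
--
-- def _records(head, pending):
--     # segment the tail: scan for the next header line, slice out the block of
--     # continuation lines before it, and emit one record per segment
--     recs = []
--     while True:
--         i = 0
--         while i < len(pending) and not _is_header(pending[i]):
--             i += 1
--         recs.append(_parse(head, pending[:i]))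
--         if i == len(pending):
--             return recs
--         head, pending = pending[i], pending[i + 1:]
--
--
-- def transcript_to_dictionary(chat_name, lines):
--     head = lines[0]
--     lines.remove(head)
--     records = _records(head, lines)
--     return {
--         'timestamp': [r[0] for r in records],
--         'chat_name': [chat_name] * len(records),
--         'sender': [r[1] for r in records],
--         'contents': [r[2] for r in records],
--     }
-- ===== Notes on version B (the rewrite author's own statement) =====
-- stated objective: faster
-- what changed: Replaces A's single stateful pass (a current_message mutated line by line, with contents grown by repeated string +=) by a segmentation algorithm: repeatedly scan forward to the next header line, slice the block of continuation lines out, and build each record's contents in one ''.join of the whole block; the four columns are then projections of the record list instead of dict lists appended to inside the loop.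
import Mathlib
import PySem

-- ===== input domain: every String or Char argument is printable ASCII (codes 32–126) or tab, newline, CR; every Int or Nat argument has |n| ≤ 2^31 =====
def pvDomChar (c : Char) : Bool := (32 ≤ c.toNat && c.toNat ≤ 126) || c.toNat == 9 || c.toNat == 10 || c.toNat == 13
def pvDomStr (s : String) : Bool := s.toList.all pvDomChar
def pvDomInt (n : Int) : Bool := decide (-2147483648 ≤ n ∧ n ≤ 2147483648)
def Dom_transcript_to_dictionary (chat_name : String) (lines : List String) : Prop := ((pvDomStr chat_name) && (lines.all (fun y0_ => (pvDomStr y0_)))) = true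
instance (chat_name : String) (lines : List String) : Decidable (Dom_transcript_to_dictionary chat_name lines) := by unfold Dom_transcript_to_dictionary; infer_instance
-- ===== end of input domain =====

-- B segments the tail into header+continuation blocks and joins each block once, instead of
-- A's stateful line-by-line pass (same return value; both remove the first element of `lines`
-- in Python — the equivalence proved here is about the return value).

-- ===== PORT A =====
-- literal transliteration of A: a 4-column dict plus a stateful current_message, one pass
def transcript_to_dictionary (chat_name : String) (lines : List String) : List (String × List String) :=
  match lines with
  | [] => []  -- Python raises IndexError at lines[0]; excluded by Pre_
  | l0 :: rest =>
    let md0 : PySem.Dict String (List String) :=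
      (((PySem.Dict.empty.insert "timestamp" []).insert "chat_name" []).insert "sender" []).insert "contents" []
    let line0 := PySem.Str.slice l0 (some 20) none
    let cm0 : String × String × String × String :=
      (PySem.Str.slice l0 none (some 17), chat_name,
       PySem.Str.slice line0 none (some (PySem.Str.find line0 ":")),
       PySem.Str.slice line0 (some (PySem.Str.find line0 ":" + 2)) none)
    let push := fun (md : PySem.Dict String (List String)) (cm : String × String × String × String) =>
      (((md.modify "timestamp" [] (· ++ [cm.1])).modify "chat_name" [] (· ++ [cm.2.1])).modify
          "sender" [] (· ++ [cm.2.2.1])).modify "contents" [] (· ++ [cm.2.2.2])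
    let step := fun (st : PySem.Dict String (List String) × (String × String × String × String)) (line : String) =>
      if PySem.Str.len line > 19 && PySem.Str.pyGet? line 2 == some '/' &&
          PySem.Str.isIn ":" (PySem.Str.slice line (some 20) none) then
        let body := PySem.Str.slice line (some 20) none
        (push st.1 st.2,
         (PySem.Str.slice line none (some 17), chat_name,
          PySem.Str.slice body none (some (PySem.Str.find body ":")),
          PySem.Str.slice body (some (PySem.Str.find body ":" + 2)) none))
      else
        (st.1, (st.2.1, st.2.2.1, st.2.2.2.1, st.2.2.2.2 ++ line))
    let fin := rest.foldl step (md0, cm0)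
    (push fin.1 fin.2).items

-- ===== PORT B =====
-- B-side helpers (Source B's _is_header / _parse / _records)
def pvIsHeader (line : String) : Bool :=
  PySem.Str.len line > 19 && PySem.Str.pyGet? line 2 == some '/' &&
    PySem.Str.isIn ":" (PySem.Str.slice line (some 20) none)

def pvParse (head : String) (block : List String) : String × String × String :=
  let body := PySem.Str.slice head (some 20) none
  let sep := PySem.Str.find body ":"
  (PySem.Str.slice head none (some 17), PySem.Str.slice body none (some sep),
   PySem.Str.slice body (some (sep + 2)) none ++ PySem.Str.join "" block)

-- Source B's _records: the inner index scan `pending[:i]` / `pending[i:]` at the first header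
-- is takeWhile/dropWhile of the non-header predicate; the while loop is this tail recursion
-- over (recs, head, pending)
def pvRecords (recs : List (String × String × String)) (head : String) (pending : List String) :
    List (String × String × String) :=
  let block := pending.takeWhile (fun l => !pvIsHeader l)
  match h : pending.dropWhile (fun l => !pvIsHeader l) with
  | [] => recs ++ [pvParse head block]
  | h' :: tl => pvRecords (recs ++ [pvParse head block]) h' tl
termination_by pending.length
decreasing_by
  have := pending.length_dropWhile_le (p := fun l => !pvIsHeader l)
  rw [h] at this; simp at this; omega

def transcript_to_dictionary_alt (chat_name : String) (lines : List String) : List (String × List String) :=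
  match lines with
  | [] => []  -- Python raises IndexError at lines[0]; excluded by Pre_
  | head :: rest =>
    let records := pvRecords [] head rest
    [("timestamp", records.map (·.1)),
     ("chat_name", List.replicate records.length chat_name),
     ("sender", records.map (·.2.1)),
     ("contents", records.map (·.2.2))]

-- ===== PRECONDITION & SPEC =====
-- Pre_ excludes only the empty list, on which Python A raises IndexError at lines[0].
def Pre_transcript_to_dictionary (chat_name : String) (lines : List String) : Prop := lines ≠ []
instance (chat_name : String) (lines : List String) : Decidable (Pre_transcript_to_dictionary chat_name lines) := by unfold Pre_transcript_to_dictionary; infer_instance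

def pvWitness_transcript_to_dictionary : String × List String :=
  ("chat", ["01/02/2023, 10:00 - bob: hi", "more text", "02/02/2023, 11:00 - ann: yo"])

def Spec_transcript_to_dictionary (chat_name : String) (lines : List String) (out : List (String × List String)) : Prop := out = transcript_to_dictionary_alt chat_name lines
instance (chat_name : String) (lines : List String) (out : List (String × List String)) : Decidable (Spec_transcript_to_dictionary chat_name lines out) := by unfold Spec_transcript_to_dictionary; infer_instance

-- ===== CLAIM (what is proved, stated in full; the proofs are below) =====
def Claim_equal_transcript_to_dictionary : Prop := ∀ (chat_name : String) (lines : List String), Dom_transcript_to_dictionary chat_name lines → Pre_transcript_to_dictionary chat_name lines → Spec_transcript_to_dictionary chat_name lines (transcript_to_dictionary chat_name lines)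

-- ===== LEMMAS AND PROOFS =====

-- A's header parsing of a single line (its record before any continuation lines are appended)
def pvParseHeader (line : String) : String × String × String :=
  let body := PySem.Str.slice line (some 20) none
  let sep := PySem.Str.find body ":"
  (PySem.Str.slice line none (some 17), PySem.Str.slice body none (some sep),
   PySem.Str.slice body (some (sep + 2)) none)

-- proof-side helpers (definitionally equal to port A's inline `push`/`step` lambdas)
def pvPush (md : PySem.Dict String (List String)) (cm : String × String × String × String) :
    PySem.Dict String (List String) :=
  (((md.modify "timestamp" [] (· ++ [cm.1])).modify "chat_name" [] (· ++ [cm.2.1])).modify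
      "sender" [] (· ++ [cm.2.2.1])).modify "contents" [] (· ++ [cm.2.2.2])

def pvStepA (chat_name : String)
    (st : PySem.Dict String (List String) × (String × String × String × String)) (line : String) :
    PySem.Dict String (List String) × (String × String × String × String) :=
  if pvIsHeader line then
    (pvPush st.1 st.2,
     ((pvParseHeader line).1, chat_name, (pvParseHeader line).2.1, (pvParseHeader line).2.2))
  else (st.1, (st.2.1, st.2.2.1, st.2.2.2.1, st.2.2.2.2 ++ line))

-- common reference shape used only by the proofs: A's list of message records, line by line
def pvGroups (cur : String × String × String) : List String → List (String × String × String)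
  | [] => [cur]
  | l :: ls =>
    if pvIsHeader l then cur :: pvGroups (pvParseHeader l) ls
    else pvGroups (cur.1, cur.2.1, cur.2.2 ++ l) ls

-- String.join over "" concatenates (bridge to the list-level Chars.join)
theorem pvJoin_cons (l : String) (rest : List String) :
    PySem.Str.join "" (l :: rest) = l ++ PySem.Str.join "" rest := by
  cases rest with
  | nil => simp [PySem.Str.join]
  | cons b bs =>
    simp [PySem.Str.join, PySem.Chars.join_cons_cons, String.ofList_append]

-- line-by-line grouping = one-shot segmentation, case: no further header line
theorem pvGroups_of_dropWhile_nil (cur : String × String × String) (ls : List String)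
    (h : ls.dropWhile (fun l => !pvIsHeader l) = []) :
    pvGroups cur ls =
      [(cur.1, cur.2.1, cur.2.2 ++ PySem.Str.join "" (ls.takeWhile (fun l => !pvIsHeader l)))] := by
  induction ls generalizing cur with
  | nil => simp [pvGroups, PySem.Str.join]
  | cons l ls ih =>
    by_cases hl : pvIsHeader l
    · simp [List.dropWhile_cons, hl] at h
    · simp only [List.dropWhile_cons, List.takeWhile_cons, hl, Bool.not_false, if_true] at h ⊢
      rw [pvGroups, if_neg hl, ih _ h, pvJoin_cons]
      simp [String.append_assoc]

-- line-by-line grouping = one-shot segmentation, case: a next header line h' exists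
theorem pvGroups_of_dropWhile_cons (cur : String × String × String) (ls : List String)
    (h' : String) (tl : List String)
    (h : ls.dropWhile (fun l => !pvIsHeader l) = h' :: tl) :
    pvGroups cur ls =
      (cur.1, cur.2.1, cur.2.2 ++ PySem.Str.join "" (ls.takeWhile (fun l => !pvIsHeader l)))
        :: pvGroups (pvParseHeader h') tl := by
  induction ls generalizing cur with
  | nil => simp at h
  | cons l ls ih =>
    by_cases hl : pvIsHeader l
    · simp only [List.dropWhile_cons, List.takeWhile_cons, hl, Bool.not_true, if_false] at h ⊢
      cases h
      rw [pvGroups, if_pos hl]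
      simp [PySem.Str.join]
    · simp only [List.dropWhile_cons, List.takeWhile_cons, hl, Bool.not_false, if_true] at h ⊢
      rw [pvGroups, if_neg hl, ih _ h, pvJoin_cons]
      simp [String.append_assoc]

-- Source B's segment loop produces exactly A's groups
theorem pvRecords_eq_groups (recs : List (String × String × String)) (head : String)
    (pending : List String) :
    pvRecords recs head pending = recs ++ pvGroups (pvParseHeader head) pending := by
  induction recs, head, pending using pvRecords.induct with
  | case1 recs head pending h =>
    rw [pvRecords]
    split
    · rw [pvGroups_of_dropWhile_nil _ _ h]
      simp [pvParse, pvParseHeader]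
    · next h' tl heq => rw [h] at heq; cases heq
  | case2 recs head pending block h' tl h ih =>
    rw [pvRecords]
    split
    · next heq => rw [h] at heq; cases heq
    · next h2 tl2 heq =>
      rw [h] at heq
      cases heq
      rw [ih, pvGroups_of_dropWhile_cons _ _ _ _ h]
      simp [pvParse, pvParseHeader, block]

-- the literal 4-key dict with given columns
def pvColDict (a b c d : List String) : PySem.Dict String (List String) :=
  PySem.Dict.mk [("timestamp", a), ("chat_name", b), ("sender", c), ("contents", d)]

theorem pvPush_colDict (chat_name : String) (a b c d : List String) (r : String × String × String) :
    pvPush (pvColDict a b c d) (r.1, chat_name, r.2.1, r.2.2)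
      = pvColDict (a ++ [r.1]) (b ++ [chat_name]) (c ++ [r.2.1]) (d ++ [r.2.2]) := by
  rfl

theorem pvA_foldl_eq (chat_name : String) (ls : List String) (a b c d : List String)
    (r : String × String × String) :
    pvPush (ls.foldl (pvStepA chat_name) (pvColDict a b c d, (r.1, chat_name, r.2.1, r.2.2))).1
        (ls.foldl (pvStepA chat_name) (pvColDict a b c d, (r.1, chat_name, r.2.1, r.2.2))).2
      = pvColDict (a ++ (pvGroups r ls).map (·.1))
          (b ++ List.replicate (pvGroups r ls).length chat_name)
          (c ++ (pvGroups r ls).map (·.2.1)) (d ++ (pvGroups r ls).map (·.2.2)) := by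
  induction ls generalizing a b c d r with
  | nil =>
    simp only [List.foldl_nil]
    rw [pvPush_colDict]
    simp [pvGroups]
  | cons l ls ih =>
    by_cases h : pvIsHeader l
    · have e : pvStepA chat_name (pvColDict a b c d, (r.1, chat_name, r.2.1, r.2.2)) l
          = (pvColDict (a ++ [r.1]) (b ++ [chat_name]) (c ++ [r.2.1]) (d ++ [r.2.2]),
             ((pvParseHeader l).1, chat_name, (pvParseHeader l).2.1, (pvParseHeader l).2.2)) := by
        unfold pvStepA
        rw [if_pos h, pvPush_colDict]
      rw [List.foldl_cons, e,
          ih (a ++ [r.1]) (b ++ [chat_name]) (c ++ [r.2.1]) (d ++ [r.2.2]) (pvParseHeader l)]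
      simp [pvGroups, h, List.replicate_succ]
    · have e : pvStepA chat_name (pvColDict a b c d, (r.1, chat_name, r.2.1, r.2.2)) l
          = (pvColDict a b c d, (r.1, chat_name, r.2.1, r.2.2 ++ l)) := by
        unfold pvStepA
        rw [if_neg h]
      rw [List.foldl_cons, e, ih a b c d (r.1, r.2.1, r.2.2 ++ l)]
      simp [pvGroups, h]

-- ===== VERDICT (by name: the statement is the Claim_ definition above) =====
theorem transcript_to_dictionary_spec : Claim_equal_transcript_to_dictionary := by
  unfold Claim_equal_transcript_to_dictionary
  intro chat_name lines _ hpre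
  unfold Spec_transcript_to_dictionary
  match lines with
  | [] => exact absurd rfl hpre
  | l0 :: rest =>
    have hA : transcript_to_dictionary chat_name (l0 :: rest)
        = (pvPush (rest.foldl (pvStepA chat_name)
              (pvColDict [] [] [] [],
               ((pvParseHeader l0).1, chat_name, (pvParseHeader l0).2.1, (pvParseHeader l0).2.2))).1
            (rest.foldl (pvStepA chat_name)
              (pvColDict [] [] [] [],
               ((pvParseHeader l0).1, chat_name, (pvParseHeader l0).2.1, (pvParseHeader l0).2.2))).2).items := rfl
    have hB : transcript_to_dictionary_alt chat_name (l0 :: rest)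
        = [("timestamp", (pvGroups (pvParseHeader l0) rest).map (·.1)),
           ("chat_name", List.replicate (pvGroups (pvParseHeader l0) rest).length chat_name),
           ("sender", (pvGroups (pvParseHeader l0) rest).map (·.2.1)),
           ("contents", (pvGroups (pvParseHeader l0) rest).map (·.2.2))] := by
      unfold transcript_to_dictionary_alt
      simp only
      rw [pvRecords_eq_groups, List.nil_append]
    rw [hA, hB, pvA_foldl_eq chat_name rest [] [] [] [] (pvParseHeader l0)]
    simp [pvColDict]
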